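-- pv_equiv track=rewrite | github.com/Erik262/AoC | day_06/puzzle.py | calculate2
-- ===== SOURCE A (Python) =====
-- import math
--
-- def calculate2(lines: list[str]) -> int:
--     lines = [l.rstrip("\n") for l in lines if l.strip()]
--     w = max(len(l) for l in lines)
--     grid = [l.ljust(w) for l in lines]
--     h = len(grid)
--
--     blocks = []
--     cur = []
--     for c in range(w):
--         col = [grid[r][c] for r in range(h)]
--         if all(ch == " " for ch in col):
--             if cur:
--                 blocks.append(cur)
--                 cur = []
--         else:
--             cur.append(c)
--     if cur:
--         blocks.append(cur)
--
--     total = 0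
--     for cols in blocks:
--         op = next(grid[h-1][c] for c in cols if grid[h-1][c] in "+*")
--         nums = []
--         for c in reversed(cols):
--             ds = [grid[r][c] for r in range(h-1) if grid[r][c] != " "]
--             if ds:
--                 nums.append(int("".join(ds)))
--         total += sum(nums) if op == "+" else math.prod(nums)
--
--     return total
-- ===== SOURCE B (Python) =====
-- def calculate2(lines: list[str]) -> int:
--     rows = [l.rstrip("\n") for l in lines if l.strip()]
--     h = len(rows)
--     w = max(len(r) for r in rows)
--     total = 0
--     op, s, p, open_ = None, 0, 1, False
--     # single streaming pass over column positions (one extra blank column flushes the last block);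
--     # no block lists are built: a running sum AND product are kept, the operator picks one at flush
--     for c in range(w + 1):
--         column = [r[c] if c < len(r) else " " for r in rows] if c < w else []
--         if all(ch == " " for ch in column):
--             if open_:
--                 total += s if op == "+" else p
--                 op, s, p, open_ = None, 0, 1, False
--         else:
--             open_ = True
--             if op is None and column[h - 1] in "+*":
--                 op = column[h - 1]
--             ds = "".join(ch for ch in column[: h - 1] if ch != " ")
--             if ds:
--                 n = int(ds)
--                 s += n
--                 p *= n
--     return total
-- ===== Notes on version B (the rewrite author's own statement) =====
-- stated objective: alternative
-- what changed: B replaces A's two-phase algorithm (materialise blocks of column indices, then re-scan the grid per block building a nums list and applying sum or math.prod) by a single streaming pass over column positions that materialises no blocks at all: it keeps a running sum AND a running product plus the first operator seen, flushes one of the two accumulators whenever a blank column (or the end) closes a block, and never builds a nums list; correct because sum and product are order-independent fold-able aggregates.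
import Mathlib
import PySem

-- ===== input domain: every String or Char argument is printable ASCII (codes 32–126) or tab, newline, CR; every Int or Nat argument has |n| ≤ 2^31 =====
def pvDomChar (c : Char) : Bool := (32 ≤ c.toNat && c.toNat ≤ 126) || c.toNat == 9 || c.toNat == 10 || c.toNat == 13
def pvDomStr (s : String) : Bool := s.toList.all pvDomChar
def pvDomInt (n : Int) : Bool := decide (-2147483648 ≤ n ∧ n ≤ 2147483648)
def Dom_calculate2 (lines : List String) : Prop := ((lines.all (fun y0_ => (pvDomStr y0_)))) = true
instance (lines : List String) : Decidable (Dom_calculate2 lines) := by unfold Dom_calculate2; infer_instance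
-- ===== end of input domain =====

-- B is a single streaming pass over column positions with running sum/product accumulators and no
-- materialised blocks, instead of A's two phases (collect blocks of column indices, then re-scan);
-- objective: alternative decomposition, same asymptotic cost.

-- shared preprocessing helpers (both Pythons contain the identical preprocessing lines)
-- s.rstrip("\n") ported by hand (exact): drop trailing '\n' characters
def pvRstripNl (cs : List Char) : List Char := (cs.reverse.dropWhile (fun c => c == '\n')).reverse
-- s.ljust(w) ported by hand (exact): pad on the right with spaces to width w
def pvLjust (cs : List Char) (w : Nat) : List Char := cs ++ List.replicate (w - cs.length) ' '
-- [l.rstrip("\n") for l in lines if l.strip()]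
def pvRows (lines : List String) : List (List Char) :=
  ((lines.map String.toList).filter (fun l => !(PySem.Chars.strip l).isEmpty)).map pvRstripNl
-- w = max(len(l) for l in lines)  (max of an empty generator raises ValueError: excluded by Pre_;
-- the width is a Nat index bound here, hence the .toNat of Python's int)
def pvWidth (rows : List (List Char)) : Nat :=
  (((PySem.List.max? (rows.map (fun l => (l.length : Int))) id).getD 0).toNat)

-- ===== PORT A =====
def calculate2 (lines : List String) : Int :=
  let rows := pvRows lines
  let w := pvWidth rows
  let grid := rows.map (fun l => pvLjust l w)
  let h := grid.length
  -- first phase: collect blocks of column indices (grid[r][c] is always in range: rows padded to width w)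
  let st := (List.range w).foldl
    (fun (st : List (List Nat) × List Nat) c =>
      let col := (List.range h).map (fun r => (grid.getD r []).getD c ' ')
      if col.all (fun ch => ch == ' ') then
        (if st.2 ≠ [] then (st.1 ++ [st.2], ([] : List Nat)) else st)
      else (st.1, st.2 ++ [c]))
    ([], [])
  let blocks := if st.2 ≠ [] then st.1 ++ [st.2] else st.1
  -- second phase: total over blocks (next(...) with no match raises StopIteration, int() may raise
  -- ValueError: both excluded by Pre_, the port's .getD defaults are never reached there)
  blocks.foldl
    (fun total cols =>
      let lastRow := grid.getD (h - 1) []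
      let op : Char :=
        (((cols.filter (fun c => (lastRow.getD c ' ') == '+' || (lastRow.getD c ' ') == '*')).head?).map
          (fun c => lastRow.getD c ' ')).getD ' '
      let nums := cols.reverse.foldl
        (fun (ns : List Int) c =>
          let ds := ((List.range (h - 1)).map (fun r => (grid.getD r []).getD c ' ')).filter
            (fun ch => ch != ' ')
          if !ds.isEmpty then ns ++ [(PySem.Int.ofChars? ds).getD 0] else ns)
        []
      total + (if op == '+' then nums.sum else nums.prod))
    0

-- ===== PORT B =====
-- one pass over c = 0 .. w (the extra position w yields the empty, blank column that flushes the
-- last block); state = (total, op option, running sum, running product, block-open flag)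
def calculate2_alt (lines : List String) : Int :=
  let rows := pvRows lines
  let h := rows.length
  let w := pvWidth rows
  ((List.range (w + 1)).foldl
    (fun (st : Int × Option Char × Int × Int × Bool) c =>
      let column := if c < w then rows.map (fun r => if c < r.length then r.getD c ' ' else ' ') else []
      if column.all (fun ch => ch == ' ') then
        if st.2.2.2.2 then
          (st.1 + (if st.2.1 == some '+' then st.2.2.1 else st.2.2.2.1),
           (none : Option Char), 0, 1, false)
        else st
      else
        let last := column.getD (h - 1) ' '
        let op := if st.2.1.isNone && (last == '+' || last == '*') then some last else st.2.1
        let ds := (column.take (h - 1)).filter (fun ch => ch != ' ')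
        if ds ≠ [] then
          let n := (PySem.Int.ofChars? ds).getD 0
          (st.1, op, st.2.2.1 + n, st.2.2.2.1 * n, true)
        else (st.1, op, st.2.2.1, st.2.2.2.1, true))
    (0, none, 0, 1, false)).1

-- spec-side helpers used by Pre_ (closed-form view of the input: its blank-separated column blocks)
def pvIsBlankCol (col : List Char) : Bool := col.all (fun ch => ch == ' ')

-- structural grouping of maximal non-blank runs (kernel-reducible; used only to STATE Pre_ and in
-- the proofs; neither port computes with it)
def pvGAux {α : Type} [DecidableEq α] (blank : α → Bool) : List α → List α → List (List α)
  | cur, [] => if cur = [] then [] else [cur]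
  | cur, x :: xs =>
    if blank x then (if cur = [] then pvGAux blank [] xs else cur :: pvGAux blank [] xs)
    else pvGAux blank (cur ++ [x]) xs

-- ===== PRECONDITION & SPEC =====
-- Pre_ excludes exactly the inputs on which the Python A raises: no non-blank line (ValueError from
-- max over an empty sequence), a block of columns with no '+'/'*' in its last row (StopIteration
-- from next), or a column whose non-space characters above the last row are not a valid int literal
-- (ValueError from int).
def Pre_calculate2 (lines : List String) : Prop :=
  pvRows lines ≠ [] ∧
  ∀ block ∈ pvGAux pvIsBlankCol [] ((List.range (pvWidth (pvRows lines))).map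
      (fun c => (pvRows lines).map (fun r => (pvLjust r (pvWidth (pvRows lines))).getD c ' '))),
    (∃ col ∈ block, (col.getLast?).getD ' ' = '+' ∨ (col.getLast?).getD ' ' = '*') ∧
    ∀ col ∈ block, col.dropLast.filter (fun ch => ch != ' ') ≠ [] →
      (PySem.Int.ofChars? (col.dropLast.filter (fun ch => ch != ' '))).isSome
instance (lines : List String) : Decidable (Pre_calculate2 lines) := by
  unfold Pre_calculate2; infer_instance

def pvWitness_calculate2 : List String := ["1 2", "3 4", "+ *"]

def Spec_calculate2 (lines : List String) (out : Int) : Prop := out = calculate2_alt lines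
instance (lines : List String) (out : Int) : Decidable (Spec_calculate2 lines out) := by unfold Spec_calculate2; infer_instance

-- ===== CLAIM (what is proved, stated in full; the proofs are below) =====
def Claim_equal_calculate2 : Prop := ∀ (lines : List String), Dom_calculate2 lines → Pre_calculate2 lines → Spec_calculate2 lines (calculate2 lines)

-- ===== LEMMAS AND PROOFS =====

def pvStep {α : Type} [DecidableEq α] (blank : α → Bool)
    (st : List (List α) × List α) (x : α) : List (List α) × List α :=
  if blank x then (if st.2 ≠ [] then (st.1 ++ [st.2], ([] : List α)) else st)
  else (st.1, st.2 ++ [x])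

def pvFinish {α : Type} [DecidableEq α] (st : List (List α) × List α) : List (List α) :=
  if st.2 ≠ [] then st.1 ++ [st.2] else st.1

-- A's index-bookkeeping fold computes pvGAux
theorem pv_gfold {α : Type} [DecidableEq α] (blank : α → Bool) (xs : List α)
    (bs : List (List α)) (cur : List α) :
    pvFinish (xs.foldl (pvStep blank) (bs, cur)) = bs ++ pvGAux blank cur xs := by
  induction xs generalizing bs cur with
  | nil =>
    by_cases h : cur = [] <;> simp [pvFinish, pvGAux, h]
  | cons x xs ih =>
    rw [List.foldl_cons]
    by_cases hb : blank x
    · by_cases hc : cur = []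
      · have hs : pvStep blank (bs, cur) x = (bs, ([] : List α)) := by
          simp [pvStep, hb, hc]
        rw [hs, ih]
        simp [pvGAux, hb, hc]
      · have hs : pvStep blank (bs, cur) x = (bs ++ [cur], ([] : List α)) := by
          simp [pvStep, hb, hc]
        rw [hs, ih]
        simp [pvGAux, hb, hc]
    · have hs : pvStep blank (bs, cur) x = (bs, cur ++ [x]) := by
        simp [pvStep, hb]
      rw [hs, ih]
      simp [pvGAux, hb]

-- pvGAux commutes with mapping the elements when the blank tests correspond
theorem pv_gaux_map {α β : Type} [DecidableEq α] [DecidableEq β] (f : α → β)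
    (bb : β → Bool) (ba : α → Bool) (hf : ∀ x, bb (f x) = ba x) (xs cur : List α) :
    pvGAux bb (cur.map f) (xs.map f) = (pvGAux ba cur xs).map (List.map f) := by
  induction xs generalizing cur with
  | nil =>
    by_cases h : cur = [] <;> simp [pvGAux, h]
  | cons x xs ih =>
    simp only [List.map_cons, pvGAux, hf]
    by_cases hb : ba x
    · by_cases hc : cur = [] <;>
        simp [hb, hc, ← ih []]
    · simpa [hb] using ih (cur ++ [x])

-- indexing a list through range n is taking its prefix
theorem pv_range_map_getD {α β : Type} (l : List α) (d : α) (f : α → β) (n : Nat)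
    (hn : n ≤ l.length) :
    (List.range n).map (fun r => f (l.getD r d)) = (l.take n).map f := by
  apply List.ext_getElem
  · simp [Nat.min_eq_left hn]
  · intro i h1 h2
    simp only [List.getElem_map, List.getElem_range, List.getElem_take]
    rw [List.getD_eq_getElem l d (by simp at h1; omega)]

-- proof-side names for the pieces of the two ports (each is definitionally its port's code)
def pvGrid (lines : List String) : List (List Char) :=
  (pvRows lines).map (fun l => pvLjust l (pvWidth (pvRows lines)))

def pvColOf (grid : List (List Char)) (c : Nat) : List Char :=
  grid.map (fun row => row.getD c ' ')

def pvColB (rows : List (List Char)) (w : Nat) (c : Nat) : List Char :=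
  rows.map (fun r => (pvLjust r w).getD c ' ')

def pvBlankA (grid : List (List Char)) (c : Nat) : Bool :=
  (((List.range grid.length).map (fun r => (grid.getD r []).getD c ' ')).all (fun ch => ch == ' '))

def pvBodyA (grid : List (List Char)) (total : Int) (cols : List Nat) : Int :=
  let lastRow := grid.getD (grid.length - 1) []
  let op : Char :=
    (((cols.filter (fun c => (lastRow.getD c ' ') == '+' || (lastRow.getD c ' ') == '*')).head?).map
      (fun c => lastRow.getD c ' ')).getD ' '
  let nums := cols.reverse.foldl
    (fun (ns : List Int) c =>
      let ds := ((List.range (grid.length - 1)).map (fun r => (grid.getD r []).getD c ' ')).filter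
        (fun ch => ch != ' ')
      if !ds.isEmpty then ns ++ [(PySem.Int.ofChars? ds).getD 0] else ns)
    []
  total + (if op == '+' then nums.sum else nums.prod)

def pvBodyB (total : Int) (block : List (List Char)) : Int :=
  let op : Char :=
    (((block.filter (fun col => ((col.getLast?).getD ' ') == '+' || ((col.getLast?).getD ' ') == '*')).head?).map
      (fun col => (col.getLast?).getD ' ')).getD ' '
  let nums := ((block.map (fun col => col.dropLast.filter (fun ch => ch != ' '))).filter
      (fun ds => !ds.isEmpty)).map (fun ds => (PySem.Int.ofChars? ds).getD 0)
  total + (if op == '+' then nums.sum else nums.prod)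

-- B's streaming step, as a function of the column (the port's loop body after selecting the column)
def pvBStep (h : Nat) (st : Int × Option Char × Int × Int × Bool) (column : List Char) :
    Int × Option Char × Int × Int × Bool :=
  if column.all (fun ch => ch == ' ') then
    if st.2.2.2.2 then
      (st.1 + (if st.2.1 == some '+' then st.2.2.1 else st.2.2.2.1),
       (none : Option Char), 0, 1, false)
    else st
  else if (column.take (h - 1)).filter (fun ch => ch != ' ') ≠ [] then
    (st.1,
     if st.2.1.isNone && (column.getD (h - 1) ' ' == '+' || column.getD (h - 1) ' ' == '*') then
       some (column.getD (h - 1) ' ') else st.2.1,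
     st.2.2.1 + (PySem.Int.ofChars? ((column.take (h - 1)).filter (fun ch => ch != ' '))).getD 0,
     st.2.2.2.1 * (PySem.Int.ofChars? ((column.take (h - 1)).filter (fun ch => ch != ' '))).getD 0,
     true)
  else
    (st.1,
     if st.2.1.isNone && (column.getD (h - 1) ' ' == '+' || column.getD (h - 1) ' ' == '*') then
       some (column.getD (h - 1) ' ') else st.2.1,
     st.2.2.1, st.2.2.2.1, true)

-- the abstract state maintained by B's loop for a currently-open run `cur`
def pvOpOf (block : List (List Char)) : Option Char :=
  ((block.filter (fun col => ((col.getLast?).getD ' ') == '+' || ((col.getLast?).getD ' ') == '*')).head?).map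
    (fun col => (col.getLast?).getD ' ')

def pvNums (block : List (List Char)) : List Int :=
  ((block.map (fun col => col.dropLast.filter (fun ch => ch != ' '))).filter
      (fun ds => !ds.isEmpty)).map (fun ds => (PySem.Int.ofChars? ds).getD 0)

theorem pv_calcA_eq (lines : List String) :
    calculate2 lines =
      (pvFinish ((List.range (pvWidth (pvRows lines))).foldl
        (pvStep (pvBlankA (pvGrid lines))) ([], []))).foldl (pvBodyA (pvGrid lines)) 0 := rfl

def pvColFull (rows : List (List Char)) (w : Nat) (c : Nat) : List Char :=
  if c < w then rows.map (fun r => if c < r.length then r.getD c ' ' else ' ') else []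

theorem pv_calcB_eq (lines : List String) :
    calculate2_alt lines =
      (((List.range (pvWidth (pvRows lines) + 1)).map
          (pvColFull (pvRows lines) (pvWidth (pvRows lines)))).foldl
        (pvBStep (pvRows lines).length) (0, none, 0, 1, false)).1 := by
  rw [List.foldl_map]; rfl

theorem pv_option_plus (o : Option Char) : (o == some '+') = (o.getD ' ' == '+') := by
  cases o with
  | none => decide
  | some c => simp

theorem pv_opOf_append (cur : List (List Char)) (x : List Char) :
    pvOpOf (cur ++ [x]) =
      if (pvOpOf cur).isNone &&
          (((x.getLast?).getD ' ') == '+' || ((x.getLast?).getD ' ') == '*') then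
        some ((x.getLast?).getD ' ')
      else pvOpOf cur := by
  simp only [pvOpOf, List.filter_append, List.head?_append]
  cases hc : (cur.filter (fun col => ((col.getLast?).getD ' ') == '+' || ((col.getLast?).getD ' ') == '*')).head? with
  | some v => simp
  | none =>
    by_cases hx : (((x.getLast?).getD ' ') == '+' || ((x.getLast?).getD ' ') == '*') <;>
      simp [List.filter, hx]

theorem pv_nums_append (cur : List (List Char)) (x : List Char) :
    pvNums (cur ++ [x]) =
      pvNums cur ++ (if (x.dropLast.filter (fun ch => ch != ' ')) ≠ [] then
        [(PySem.Int.ofChars? (x.dropLast.filter (fun ch => ch != ' '))).getD 0] else []) := by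
  simp only [pvNums, List.map_append, List.filter_append, List.map_append]
  by_cases hx : (x.dropLast.filter (fun ch => ch != ' ')) = [] <;>
    simp [List.filter, List.map, hx]

-- B's streaming fold over the columns (plus the trailing blank column) equals folding the
-- block-level body over the maximal non-blank runs
theorem pv_stream_eq (h : Nat) (h1 : 1 ≤ h) (cols : List (List Char))
    (hlen : ∀ col ∈ cols, col.length = h) (gt : Int) (cur : List (List Char)) :
    ((cols ++ [[]]).foldl (pvBStep h)
        (gt, pvOpOf cur, (pvNums cur).sum, (pvNums cur).prod, decide (cur ≠ []))).1
      = (pvGAux pvIsBlankCol cur cols).foldl pvBodyB gt := by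
  induction cols generalizing gt cur with
  | nil =>
    by_cases hc : cur = []
    · simp [pvBStep, pvGAux, hc]
    · simp only [List.nil_append, List.foldl_cons, List.foldl_nil, pvGAux, if_neg hc]
      have : pvBStep h (gt, pvOpOf cur, (pvNums cur).sum, (pvNums cur).prod, decide (cur ≠ []))
          ([] : List Char) =
          (gt + (if pvOpOf cur == some '+' then (pvNums cur).sum else (pvNums cur).prod),
           none, 0, 1, false) := by
        simp [pvBStep, hc]
      rw [this]
      simp [pvBodyB, pvOpOf, pvNums, pv_option_plus]
  | cons x xs ih =>
    have hxlen : x.length = h := hlen x (by simp)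
    have hxs : ∀ col ∈ xs, col.length = h := fun col hm => hlen col (by simp [hm])
    rw [List.cons_append, List.foldl_cons]
    by_cases hb : pvIsBlankCol x
    · have hstep : pvBStep h (gt, pvOpOf cur, (pvNums cur).sum, (pvNums cur).prod, decide (cur ≠ []))
          x =
          if cur ≠ [] then
            (gt + (if pvOpOf cur == some '+' then (pvNums cur).sum else (pvNums cur).prod),
             none, 0, 1, false)
          else (gt, pvOpOf cur, (pvNums cur).sum, (pvNums cur).prod, decide (cur ≠ [])) := by
        have hbx : (x.all (fun ch => ch == ' ')) = true := hb
        by_cases hc : cur = []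
        · simp only [pvBStep, hbx, if_true, hc]
          simp
        · simp only [pvBStep, hbx, if_true]
          simp [hc]
      by_cases hc : cur = []
      · rw [hstep, if_neg (by simp [hc])]
        rw [show pvGAux pvIsBlankCol cur (x :: xs) = pvGAux pvIsBlankCol [] xs by
          simp [pvGAux, hb, hc]]
        have := ih (gt := gt) (hlen := hxs) (cur := [])
        simpa [pvOpOf, pvNums, hc] using this
      · rw [hstep, if_pos hc]
        rw [show pvGAux pvIsBlankCol cur (x :: xs) = cur :: pvGAux pvIsBlankCol [] xs by
          simp [pvGAux, hb, hc]]
        rw [List.foldl_cons]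
        have hbody : pvBodyB gt cur =
            gt + (if pvOpOf cur == some '+' then (pvNums cur).sum else (pvNums cur).prod) := by
          simp [pvBodyB, pvOpOf, pvNums, pv_option_plus]
        rw [hbody.symm] at *
        have := ih (gt := pvBodyB gt cur) (hlen := hxs) (cur := [])
        simpa [pvOpOf, pvNums, hbody] using this
    · -- non-blank column: the run grows
      have hxl : x.length = h := hxlen
      have hidx : h - 1 = x.length - 1 := by omega
      have hnb : (x.all (fun ch => ch == ' ')) = false := by
        simpa [pvIsBlankCol] using hb
      have hlt : x.length - 1 < x.length := by omega
      have hlast : x.getD (x.length - 1) ' ' = (x.getLast?).getD ' ' := by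
        rw [List.getD_eq_getElem x ' ' hlt, List.getLast?_eq_getElem?,
          List.getElem?_eq_getElem hlt, Option.getD_some]
      have htake : x.take (x.length - 1) = x.dropLast := by
        rw [← List.dropLast_eq_take]
      have hstep : pvBStep h (gt, pvOpOf cur, (pvNums cur).sum, (pvNums cur).prod, decide (cur ≠ []))
          x =
          (gt, pvOpOf (cur ++ [x]), (pvNums (cur ++ [x])).sum, (pvNums (cur ++ [x])).prod,
           decide (cur ++ [x] ≠ [])) := by
        unfold pvBStep
        rw [hnb, hidx, htake, hlast, pv_opOf_append, pv_nums_append]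
        by_cases hds : (x.dropLast.filter (fun ch => ch != ' ')) = [] <;>
          simp [hds]
      rw [hstep]
      rw [show pvGAux pvIsBlankCol cur (x :: xs) = pvGAux pvIsBlankCol (cur ++ [x]) xs by
        simp [pvGAux, hb]]
      exact ih (gt := gt) (hlen := hxs) (cur := cur ++ [x])

theorem pv_colB_eq_colOf (lines : List String) :
    pvColB (pvRows lines) (pvWidth (pvRows lines)) = pvColOf (pvGrid lines) := by
  funext c
  rw [pvColOf, pvGrid, List.map_map]
  rfl

theorem pv_ljust_getD (r : List Char) (w c : Nat) :
    (pvLjust r w).getD c ' ' = if c < r.length then r.getD c ' ' else ' ' := by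
  rw [List.getD_eq_getElem?_getD, pvLjust, List.getElem?_append]
  by_cases hc : c < r.length
  · simp [hc, List.getD_eq_getElem?_getD]
  · simp only [hc, if_false]
    rw [List.getElem?_replicate]
    split_ifs <;> rfl

theorem pv_colFull_eq (rows : List (List Char)) (w c : Nat) (hc : c < w) :
    pvColFull rows w c = pvColB rows w c := by
  rw [pvColFull, if_pos hc, pvColB]
  exact (List.map_congr_left (fun r _ => by rw [pv_ljust_getD])).symm

theorem pv_blank_eq (grid : List (List Char)) (c : Nat) :
    pvIsBlankCol (pvColOf grid c) = pvBlankA grid c := by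
  rw [pvIsBlankCol, pvColOf, pvBlankA,
    pv_range_map_getD grid [] (fun row => row.getD c ' ') grid.length le_rfl, List.take_length]

theorem pv_last_eq (grid : List (List Char)) (hg : grid ≠ []) (c : Nat) :
    ((pvColOf grid c).getLast?).getD ' ' = (grid.getD (grid.length - 1) []).getD c ' ' := by
  have hlen : grid.length - 1 < grid.length := by
    cases grid with
    | nil => exact absurd rfl hg
    | cons a l => simp
  rw [pvColOf, List.getLast?_eq_getElem?]
  simp [List.getElem?_map, List.getElem?_eq_getElem hlen]

theorem pv_ds_eq (grid : List (List Char)) (c : Nat) :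
    (pvColOf grid c).dropLast.filter (fun ch => ch != ' ') =
      ((List.range (grid.length - 1)).map (fun r => (grid.getD r []).getD c ' ')).filter
        (fun ch => ch != ' ') := by
  rw [pvColOf, ← List.map_dropLast,
    pv_range_map_getD grid [] (fun row => row.getD c ' ') (grid.length - 1) (Nat.sub_le _ _),
    ← List.dropLast_eq_take]

theorem pv_body_eq (grid : List (List Char)) (hg : grid ≠ []) (total : Int) (cols : List Nat) :
    pvBodyB total (cols.map (pvColOf grid)) = pvBodyA grid total cols := by
  simp only [pvBodyB, pvBodyA]
  rw [PySem.List.foldl_append_if, List.nil_append, List.filter_reverse, List.map_reverse,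
    List.sum_reverse, List.prod_reverse]
  rw [List.filter_map, List.head?_map, Option.map_map, List.map_map, List.filter_map,
    List.map_map]
  simp only [Function.comp_def, pv_last_eq grid hg, pv_ds_eq grid]

theorem calculate2_agree (lines : List String) : calculate2 lines = calculate2_alt lines := by
  by_cases hr : pvRows lines = []
  · rw [pv_calcA_eq, pv_calcB_eq, hr]
    simp [pvWidth, PySem.List.max?, pvFinish, pvColFull, pvBStep, List.range_succ]
  · have hg : pvGrid lines ≠ [] := by
      rw [pvGrid]
      simpa using hr
    have h1 : 1 ≤ (pvRows lines).length := by
      cases h : pvRows lines with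
      | nil => exact absurd h hr
      | cons a l => simp
    -- rewrite B's column list into the mapped columns and split off the trailing blank column
    rw [pv_calcA_eq, pv_calcB_eq, List.range_succ, List.map_append]
    have hmapcols : (List.range (pvWidth (pvRows lines))).map
        (pvColFull (pvRows lines) (pvWidth (pvRows lines))) =
        (List.range (pvWidth (pvRows lines))).map (pvColOf (pvGrid lines)) := by
      refine List.map_congr_left (fun c hc => ?_)
      rw [pv_colFull_eq _ _ _ (List.mem_range.mp hc), ← pv_colB_eq_colOf]
    rw [hmapcols, List.map_singleton,
      show pvColFull (pvRows lines) (pvWidth (pvRows lines)) (pvWidth (pvRows lines)) = [] by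
        simp [pvColFull]]
    have hlen : ∀ col ∈ (List.range (pvWidth (pvRows lines))).map (pvColOf (pvGrid lines)),
        col.length = (pvRows lines).length := by
      intro col hm
      rcases List.mem_map.mp hm with ⟨c, _, rfl⟩
      simp [pvColOf, pvGrid]
    have hstream := pv_stream_eq (pvRows lines).length h1
      ((List.range (pvWidth (pvRows lines))).map (pvColOf (pvGrid lines))) hlen 0 []
    simp only [pvOpOf, pvNums, List.filter_nil, List.map_nil, List.head?_nil, Option.map_none,
      List.sum_nil, List.prod_nil, ne_eq, not_true_eq_false, decide_false] at hstream
    rw [hstream]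
    -- A's side: blocks of indices mapped to columns
    rw [pv_gfold, List.nil_append]
    have hmap := pv_gaux_map (pvColOf (pvGrid lines)) pvIsBlankCol (pvBlankA (pvGrid lines))
      (pv_blank_eq (pvGrid lines)) (List.range (pvWidth (pvRows lines))) []
    simp only [List.map_nil] at hmap
    rw [hmap, List.foldl_map]
    exact PySem.List.foldl_congr_mem _ _ _ _
      (fun acc x _ => (pv_body_eq (pvGrid lines) hg acc x).symm)

-- ===== VERDICT (by name: the statement is the Claim_ definition above) =====
theorem calculate2_spec : Claim_equal_calculate2 := by
  intro lines _ _
  exact calculate2_agree lines
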